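-- pv_equiv track=rewrite | github.com/lx-0/pixel-realm | scripts/gen_promo_art.py | text_width
-- ===== SOURCE A (Python) =====
-- FONT = {
--     'A': [[0,1,0],[1,0,1],[1,1,1],[1,0,1],[1,0,1]],
--     'B': [[1,1,0],[1,0,1],[1,1,0],[1,0,1],[1,1,0]],
--     'C': [[0,1,1],[1,0,0],[1,0,0],[1,0,0],[0,1,1]],
--     'D': [[1,1,0],[1,0,1],[1,0,1],[1,0,1],[1,1,0]],
--     'E': [[1,1,1],[1,0,0],[1,1,0],[1,0,0],[1,1,1]],
--     'F': [[1,1,1],[1,0,0],[1,1,0],[1,0,0],[1,0,0]],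
--     'G': [[0,1,1],[1,0,0],[1,0,1],[1,0,1],[0,1,1]],
--     'H': [[1,0,1],[1,0,1],[1,1,1],[1,0,1],[1,0,1]],
--     'I': [[1,1,1],[0,1,0],[0,1,0],[0,1,0],[1,1,1]],
--     'J': [[0,0,1],[0,0,1],[0,0,1],[1,0,1],[0,1,0]],
--     'K': [[1,0,1],[1,0,1],[1,1,0],[1,0,1],[1,0,1]],
--     'L': [[1,0,0],[1,0,0],[1,0,0],[1,0,0],[1,1,1]],
--     'M': [[1,0,1],[1,1,1],[1,1,1],[1,0,1],[1,0,1]],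
--     'N': [[1,0,1],[1,1,1],[1,1,1],[1,0,1],[1,0,1]],
--     'O': [[0,1,0],[1,0,1],[1,0,1],[1,0,1],[0,1,0]],
--     'P': [[1,1,0],[1,0,1],[1,1,0],[1,0,0],[1,0,0]],
--     'Q': [[0,1,0],[1,0,1],[1,0,1],[1,1,1],[0,1,1]],
--     'R': [[1,1,0],[1,0,1],[1,1,0],[1,0,1],[1,0,1]],
--     'S': [[0,1,1],[1,0,0],[0,1,0],[0,0,1],[1,1,0]],
--     'T': [[1,1,1],[0,1,0],[0,1,0],[0,1,0],[0,1,0]],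
--     'U': [[1,0,1],[1,0,1],[1,0,1],[1,0,1],[0,1,0]],
--     'V': [[1,0,1],[1,0,1],[1,0,1],[1,0,1],[0,1,0]],
--     'W': [[1,0,1],[1,0,1],[1,1,1],[1,1,1],[1,0,1]],
--     'X': [[1,0,1],[1,0,1],[0,1,0],[1,0,1],[1,0,1]],
--     'Y': [[1,0,1],[1,0,1],[0,1,0],[0,1,0],[0,1,0]],
--     'Z': [[1,1,1],[0,0,1],[0,1,0],[1,0,0],[1,1,1]],
--     '0': [[0,1,0],[1,0,1],[1,0,1],[1,0,1],[0,1,0]],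
--     '1': [[0,1,0],[1,1,0],[0,1,0],[0,1,0],[1,1,1]],
--     '2': [[0,1,0],[1,0,1],[0,0,1],[0,1,0],[1,1,1]],
--     '3': [[1,1,0],[0,0,1],[0,1,0],[0,0,1],[1,1,0]],
--     '4': [[1,0,1],[1,0,1],[1,1,1],[0,0,1],[0,0,1]],
--     '5': [[1,1,1],[1,0,0],[1,1,0],[0,0,1],[1,1,0]],
--     '6': [[0,1,1],[1,0,0],[1,1,0],[1,0,1],[0,1,0]],
--     '7': [[1,1,1],[0,0,1],[0,1,0],[0,1,0],[0,1,0]],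
--     '8': [[0,1,0],[1,0,1],[0,1,0],[1,0,1],[0,1,0]],
--     '9': [[0,1,0],[1,0,1],[0,1,1],[0,0,1],[1,1,0]],
--     '.': [[0,0,0],[0,0,0],[0,0,0],[0,0,0],[0,1,0]],
--     '!': [[0,1,0],[0,1,0],[0,1,0],[0,0,0],[0,1,0]],
--     '-': [[0,0,0],[0,0,0],[1,1,1],[0,0,0],[0,0,0]],
--     ':': [[0,0,0],[0,1,0],[0,0,0],[0,1,0],[0,0,0]],
--     ' ': [[0,0,0],[0,0,0],[0,0,0],[0,0,0],[0,0,0]],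
-- }
--
-- def text_width(text, scale=1):
--     w = 0
--     for ch in text.upper():
--         glyph = FONT.get(ch)
--         if glyph is None:
--             w += 4 * scale
--         else:
--             w += (len(glyph[0]) + 1) * scale
--     return w - scale
-- ===== SOURCE B (Python) =====
-- def text_width(text, scale=1):
--     # Every FONT glyph is 3 pixels wide and unknown characters also count 4*scale,
--     # so each character contributes exactly 4*scale; closed form, O(1).
--     return (4 * len(text) - 1) * scale
-- ===== Notes on version B (the rewrite author's own statement) =====
-- stated objective: faster
-- what changed: Replaces the per-character loop over the glyph table with the closed form (4*len(text)-1)*scale, exact because every glyph (and the missing-glyph fallback) contributes 4*scale.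
import Mathlib
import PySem

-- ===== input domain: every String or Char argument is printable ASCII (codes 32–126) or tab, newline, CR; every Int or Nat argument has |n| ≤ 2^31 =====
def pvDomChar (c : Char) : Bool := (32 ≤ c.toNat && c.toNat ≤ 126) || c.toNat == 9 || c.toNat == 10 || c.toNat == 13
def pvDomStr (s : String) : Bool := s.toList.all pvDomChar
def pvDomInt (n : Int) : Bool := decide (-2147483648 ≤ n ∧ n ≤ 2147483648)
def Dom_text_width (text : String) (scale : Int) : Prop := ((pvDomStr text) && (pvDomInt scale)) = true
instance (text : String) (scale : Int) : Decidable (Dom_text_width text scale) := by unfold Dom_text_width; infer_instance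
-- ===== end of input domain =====

-- B replaces A's per-character glyph-table loop by the closed form (4*len(text)-1)*scale,
-- exact because every glyph (and the missing-glyph fallback) contributes 4*scale; objective: faster.

-- ===== PORT A =====
def FONT : PySem.Dict Char (List (List Int)) := PySem.Dict.ofList [
  ('A', [[0, 1, 0], [1, 0, 1], [1, 1, 1], [1, 0, 1], [1, 0, 1]]),
  ('B', [[1, 1, 0], [1, 0, 1], [1, 1, 0], [1, 0, 1], [1, 1, 0]]),
  ('C', [[0, 1, 1], [1, 0, 0], [1, 0, 0], [1, 0, 0], [0, 1, 1]]),
  ('D', [[1, 1, 0], [1, 0, 1], [1, 0, 1], [1, 0, 1], [1, 1, 0]]),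
  ('E', [[1, 1, 1], [1, 0, 0], [1, 1, 0], [1, 0, 0], [1, 1, 1]]),
  ('F', [[1, 1, 1], [1, 0, 0], [1, 1, 0], [1, 0, 0], [1, 0, 0]]),
  ('G', [[0, 1, 1], [1, 0, 0], [1, 0, 1], [1, 0, 1], [0, 1, 1]]),
  ('H', [[1, 0, 1], [1, 0, 1], [1, 1, 1], [1, 0, 1], [1, 0, 1]]),
  ('I', [[1, 1, 1], [0, 1, 0], [0, 1, 0], [0, 1, 0], [1, 1, 1]]),
  ('J', [[0, 0, 1], [0, 0, 1], [0, 0, 1], [1, 0, 1], [0, 1, 0]]),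
  ('K', [[1, 0, 1], [1, 0, 1], [1, 1, 0], [1, 0, 1], [1, 0, 1]]),
  ('L', [[1, 0, 0], [1, 0, 0], [1, 0, 0], [1, 0, 0], [1, 1, 1]]),
  ('M', [[1, 0, 1], [1, 1, 1], [1, 1, 1], [1, 0, 1], [1, 0, 1]]),
  ('N', [[1, 0, 1], [1, 1, 1], [1, 1, 1], [1, 0, 1], [1, 0, 1]]),
  ('O', [[0, 1, 0], [1, 0, 1], [1, 0, 1], [1, 0, 1], [0, 1, 0]]),
  ('P', [[1, 1, 0], [1, 0, 1], [1, 1, 0], [1, 0, 0], [1, 0, 0]]),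
  ('Q', [[0, 1, 0], [1, 0, 1], [1, 0, 1], [1, 1, 1], [0, 1, 1]]),
  ('R', [[1, 1, 0], [1, 0, 1], [1, 1, 0], [1, 0, 1], [1, 0, 1]]),
  ('S', [[0, 1, 1], [1, 0, 0], [0, 1, 0], [0, 0, 1], [1, 1, 0]]),
  ('T', [[1, 1, 1], [0, 1, 0], [0, 1, 0], [0, 1, 0], [0, 1, 0]]),
  ('U', [[1, 0, 1], [1, 0, 1], [1, 0, 1], [1, 0, 1], [0, 1, 0]]),
  ('V', [[1, 0, 1], [1, 0, 1], [1, 0, 1], [1, 0, 1], [0, 1, 0]]),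
  ('W', [[1, 0, 1], [1, 0, 1], [1, 1, 1], [1, 1, 1], [1, 0, 1]]),
  ('X', [[1, 0, 1], [1, 0, 1], [0, 1, 0], [1, 0, 1], [1, 0, 1]]),
  ('Y', [[1, 0, 1], [1, 0, 1], [0, 1, 0], [0, 1, 0], [0, 1, 0]]),
  ('Z', [[1, 1, 1], [0, 0, 1], [0, 1, 0], [1, 0, 0], [1, 1, 1]]),
  ('0', [[0, 1, 0], [1, 0, 1], [1, 0, 1], [1, 0, 1], [0, 1, 0]]),
  ('1', [[0, 1, 0], [1, 1, 0], [0, 1, 0], [0, 1, 0], [1, 1, 1]]),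
  ('2', [[0, 1, 0], [1, 0, 1], [0, 0, 1], [0, 1, 0], [1, 1, 1]]),
  ('3', [[1, 1, 0], [0, 0, 1], [0, 1, 0], [0, 0, 1], [1, 1, 0]]),
  ('4', [[1, 0, 1], [1, 0, 1], [1, 1, 1], [0, 0, 1], [0, 0, 1]]),
  ('5', [[1, 1, 1], [1, 0, 0], [1, 1, 0], [0, 0, 1], [1, 1, 0]]),
  ('6', [[0, 1, 1], [1, 0, 0], [1, 1, 0], [1, 0, 1], [0, 1, 0]]),
  ('7', [[1, 1, 1], [0, 0, 1], [0, 1, 0], [0, 1, 0], [0, 1, 0]]),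
  ('8', [[0, 1, 0], [1, 0, 1], [0, 1, 0], [1, 0, 1], [0, 1, 0]]),
  ('9', [[0, 1, 0], [1, 0, 1], [0, 1, 1], [0, 0, 1], [1, 1, 0]]),
  ('.', [[0, 0, 0], [0, 0, 0], [0, 0, 0], [0, 0, 0], [0, 1, 0]]),
  ('!', [[0, 1, 0], [0, 1, 0], [0, 1, 0], [0, 0, 0], [0, 1, 0]]),
  ('-', [[0, 0, 0], [0, 0, 0], [1, 1, 1], [0, 0, 0], [0, 0, 0]]),
  (':', [[0, 0, 0], [0, 1, 0], [0, 0, 0], [0, 1, 0], [0, 0, 0]]),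
  (' ', [[0, 0, 0], [0, 0, 0], [0, 0, 0], [0, 0, 0], [0, 0, 0]])]

-- glyph[0] never raises: every FONT value is a nonempty list, so '(….map PySem.List.len).getD 0'
-- is exactly Python's len(glyph[0]) here.
def text_width (text : String) (scale : Int) : Int :=
  ((PySem.Str.upper text).toList.foldl
    (fun w ch =>
      match FONT.get? ch with
      | none => w + 4 * scale
      | some glyph => w + (((PySem.List.pyGet? glyph 0).map PySem.List.len).getD 0 + 1) * scale)
    0) - scale

-- ===== PORT B =====
def text_width_alt (text : String) (scale : Int) : Int :=
  (4 * PySem.Str.len text - 1) * scale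

-- ===== PRECONDITION & SPEC =====
def Spec_text_width (text : String) (scale : Int) (out : Int) : Prop := out = text_width_alt text scale
instance (text : String) (scale : Int) (out : Int) : Decidable (Spec_text_width text scale out) := by unfold Spec_text_width; infer_instance

-- ===== CLAIM (what is proved, stated in full; the proofs are below) =====
def Claim_equal_text_width : Prop := ∀ (text : String) (scale : Int), Dom_text_width text scale → Spec_text_width text scale (text_width text scale)

-- ===== LEMMAS AND PROOFS =====

-- every FONT glyph's first row has length 3
lemma font_rows : FONT.values.all
    (fun g => ((PySem.List.pyGet? g 0).map PySem.List.len).getD 0 == 3) = true := by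
  set_option maxRecDepth 4096 in decide

lemma step_eq (scale w : Int) (ch : Char) :
    (match FONT.get? ch with
      | none => w + 4 * scale
      | some glyph => w + (((PySem.List.pyGet? glyph 0).map PySem.List.len).getD 0 + 1) * scale)
    = w + 4 * scale := by
  cases h : FONT.get? ch with
  | none => rfl
  | some g =>
    have hg : g ∈ FONT.values := by
      have := PySem.Dict.mem_items_of_get?_eq_some (d := FONT) h
      simpa only [PySem.Dict.values] using List.mem_map_of_mem (f := Prod.snd) this
    have h3 := List.all_eq_true.mp font_rows g hg
    have h3' : ((PySem.List.pyGet? g 0).map PySem.List.len).getD 0 = 3 := by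
      simpa using h3
    simp only []
    rw [h3']
    ring

lemma foldl_step (scale : Int) (l : List Char) (w : Int) :
    l.foldl (fun w ch =>
      match FONT.get? ch with
      | none => w + 4 * scale
      | some glyph => w + (((PySem.List.pyGet? glyph 0).map PySem.List.len).getD 0 + 1) * scale)
      w = w + 4 * scale * l.length := by
  induction l generalizing w with
  | nil => simp
  | cons c cs ih =>
    rw [List.foldl_cons, step_eq, ih]
    simp [List.length_cons]
    ring

-- ===== VERDICT (by name: the statement is the Claim_ definition above) =====
theorem text_width_spec : Claim_equal_text_width := by
  intro text scale _
  unfold Spec_text_width text_width text_width_alt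
  rw [foldl_step]
  have hlen : (PySem.Str.upper text).toList.length = text.toList.length := by
    simp [PySem.Str.toList_upper, PySem.Chars.upper]
  rw [hlen]
  simp [PySem.Str.len_eq]
  ring
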